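-- pv_equiv track=rewrite | github.com/Jerubaal42/python | netmasker.py | broadcaster
-- ===== SOURCE A (Python) =====
-- def broadcaster(broadvar):
-- 	testvar=0
-- 	dabroadcast=0
-- 	for each in range(0,len(broadvar)):
-- 		if broadvar[each]==255:
-- 			continue
-- 		else:
-- 			testvar=broadvar[each]
-- 			break
-- 	for each in range(0,8):
-- 		if ((testvar<<each)&255)==128:
-- 			dabroadcast=(((testvar<<each)&255)>>each)
-- 			break
-- 	if dabroadcast==0:
-- 		dabroadcast=256
-- 	return(dabroadcast)
-- ===== SOURCE B (Python) =====
-- def broadcaster(broadvar):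
--     testvar = next((o for o in broadvar if o != 255), 0)
--     m = testvar % 256
--     return 256 if m == 0 else m & -m
-- ===== Notes on version B (the rewrite author's own statement) =====
-- stated objective: simpler
-- what changed: B keeps the linear scan for the first octet != 255 but replaces A's 8-iteration shift-and-mask bit scan by the closed form on the low byte: m = testvar % 256, returning 256 if m == 0 else m & -m (the lowest set bit).
import Mathlib
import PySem

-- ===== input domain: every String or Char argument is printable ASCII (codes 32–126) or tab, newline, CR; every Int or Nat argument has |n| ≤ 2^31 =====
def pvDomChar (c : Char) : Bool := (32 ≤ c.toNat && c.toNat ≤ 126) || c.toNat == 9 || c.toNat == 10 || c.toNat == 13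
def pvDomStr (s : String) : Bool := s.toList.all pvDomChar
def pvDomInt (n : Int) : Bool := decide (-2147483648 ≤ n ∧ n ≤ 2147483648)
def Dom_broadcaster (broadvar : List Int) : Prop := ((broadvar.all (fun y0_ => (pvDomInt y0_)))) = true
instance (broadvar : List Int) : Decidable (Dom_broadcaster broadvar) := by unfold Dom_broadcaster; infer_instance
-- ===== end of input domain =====

-- B replaces A's 8-iteration bit-scan by the closed form m & -m on the low byte m = testvar % 256 (simpler; same cost).


-- ===== PORT A =====
-- first loop: scan for the first octet ≠ 255 (testvar stays 0 if none); continue/break become recursion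
def broadcasterFirst : List Int → Int
  | [] => 0
  | x :: xs => if x = 255 then broadcasterFirst xs else x

-- second loop: for each in range(0,8) with break; the list of remaining indices drives the recursion
def broadcasterBitLoop (testvar : Int) : List Nat → Int
  | [] => 0
  | e :: rest =>
      if PySem.Int.band (testvar <<< e) 255 = 128 then
        (PySem.Int.band (testvar <<< e) 255) >>> e
      else broadcasterBitLoop testvar rest

def broadcaster (broadvar : List Int) : Int :=
  let testvar := broadcasterFirst broadvar
  let dabroadcast := broadcasterBitLoop testvar (List.range 8)
  if dabroadcast = 0 then 256 else dabroadcast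

-- ===== PORT B =====
-- next((o for o in broadvar if o != 255), 0)
def broadcasterAltFirst : List Int → Int
  | [] => 0
  | x :: xs => if x ≠ 255 then x else broadcasterAltFirst xs

def broadcaster_alt (broadvar : List Int) : Int :=
  let testvar := broadcasterAltFirst broadvar
  let m := testvar % 256
  if m = 0 then 256 else PySem.Int.band m (-m)

-- ===== PRECONDITION & SPEC =====
def Spec_broadcaster (broadvar : List Int) (out : Int) : Prop := out = broadcaster_alt broadvar
instance (broadvar : List Int) (out : Int) : Decidable (Spec_broadcaster broadvar out) := by unfold Spec_broadcaster; infer_instance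

-- ===== CLAIM (what is proved, stated in full; the proofs are below) =====
def Claim_equal_broadcaster : Prop := ∀ (broadvar : List Int), Dom_broadcaster broadvar → Spec_broadcaster broadvar (broadcaster broadvar)

-- ===== LEMMAS AND PROOFS =====

-- the two linear scans agree
lemma first_eq (xs : List Int) : broadcasterFirst xs = broadcasterAltFirst xs := by
  induction xs with
  | nil => rfl
  | cons x xs ih =>
    simp only [broadcasterFirst, broadcasterAltFirst, ne_eq, ite_not]
    by_cases h : x = 255 <;> simp [h, ih]

-- Python's  x & 255  is the low byte, i.e.  x % 256  (floor mod)
lemma nat_and_255 (n : Nat) : n &&& 255 = n % 256 := by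
  simpa using Nat.and_two_pow_sub_one_eq_mod n 8

lemma band255 (x : Int) : PySem.Int.band x 255 = x % 256 := by
  rcases x with n | m
  · show PySem.Int.band (Int.ofNat n) 255 = Int.ofNat n % 256
    have h255 : (255:Int).toNat = 255 := rfl
    simp only [PySem.Int.band, h255]
    norm_num [nat_and_255]
  · show PySem.Int.band (Int.negSucc m) 255 = Int.negSucc m % 256
    have h255 : (255:Int).toNat = 255 := rfl
    simp only [PySem.Int.band, h255]
    norm_num [Nat.and_comm 255, nat_and_255]
    omega

-- the bit loop only looks at the low byte of testvar
lemma loop_congr (t : Int) (l : List Nat) :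
    broadcasterBitLoop t l = broadcasterBitLoop (t % 256) l := by
  induction l with
  | nil => rfl
  | cons e rest ih =>
    have hsh : ∀ y : Int, PySem.Int.band (y <<< e) 255 = (y * 2 ^ e) % 256 := by
      intro y; rw [band255, Int.shiftLeft_eq]
    have hmod : (t * 2 ^ e) % 256 = (t % 256 * 2 ^ e) % 256 := by
      conv_lhs => rw [Int.mul_emod, ← Int.emod_emod_of_dvd t (dvd_refl 256), ← Int.mul_emod]
    simp only [broadcasterBitLoop, hsh, hmod, ih]

-- on each of the 256 possible low bytes the two tails agree
set_option maxRecDepth 100000 in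
lemma key : ∀ r : Fin 256,
    (if broadcasterBitLoop (r : Int) (List.range 8) = 0 then 256
     else broadcasterBitLoop (r : Int) (List.range 8)) =
    (if (r : Int) = 0 then 256 else PySem.Int.band (r : Int) (-(r : Int))) := by
  decide

-- ===== VERDICT (by name: the statement is the Claim_ definition above) =====
theorem broadcaster_spec : Claim_equal_broadcaster := by
  intro broadvar _
  unfold Spec_broadcaster broadcaster broadcaster_alt
  rw [first_eq]
  set t := broadcasterAltFirst broadvar with ht
  show (if broadcasterBitLoop t (List.range 8) = 0 then (256 : Int)
        else broadcasterBitLoop t (List.range 8)) =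
       (if t % 256 = 0 then (256 : Int) else PySem.Int.band (t % 256) (-(t % 256)))
  have h0 : 0 ≤ t % 256 := Int.emod_nonneg t (by norm_num)
  have h1 : t % 256 < 256 := Int.emod_lt_of_pos t (by norm_num)
  have hr : ((⟨(t % 256).toNat, by omega⟩ : Fin 256) : Int) = t % 256 := by
    simp; omega
  have := key ⟨(t % 256).toNat, by omega⟩
  rw [hr] at this
  rw [loop_congr]
  exact this
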